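-- pv_equiv track=rewrite | github.com/AIAmplitudes/AIAmplitudes_common_public | src/aiamplitudes_common_public/uncompressor.py | DihedralEq
-- ===== SOURCE A (Python) =====
-- def Subst(key, transf):
--     """Apply a 6-letter permutation (string transf) to key."""
--     res = ""
--     for l in key:
--         res += transf[ord(l) - ord('a')]
--     return res
--
-- def DihedralEq(key):
--     """Return the set of (up to 6) dihedral equivalents of key."""
--     result = set()
--     rotations = ["cabfde", "bcaefd", "abcdef"]
--     flip = "bacedf"
--     for i in range(3):
--         result.add(Subst(key, rotations[i]))
--         result.add(Subst(Subst(key, rotations[i]), flip))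
--     return result
-- ===== SOURCE B (Python) =====
-- def DihedralEq(key):
--     """Return the set of (up to 6) dihedral equivalents of key."""
--     rot, flip = "cabfde", "bacedf"
--
--     def subst(s, table):
--         m = dict(zip("abcdef", table))
--         return "".join(m[c] for c in s)
--
--     # Build the six permutation tables of the dihedral group from its two
--     # generators: r, r*flip, r^2, r^2*flip, r^3 (=id), r^3*flip.
--     group = []
--     p = rot
--     for _ in range(3):
--         group.append(p)
--         group.append(subst(p, flip))
--         p = subst(p, rot)
--     return {subst(key, g) for g in group}
-- ===== Notes on version B (the rewrite author's own statement) =====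
-- stated objective: faster
-- what changed: B builds the six dihedral permutation tables once by composing the two generator strings and then substitutes the key a single time per table (6 passes, dict lookup + join), replacing A's nested double substitution of the key per rotation (9 key-length passes). Pre_ excludes keys with a character outside the letters a-f, on which A raises IndexError or (for the six characters just below lowercase a) returns an accidental value via Python negative-index wraparound, while B raises KeyError.
-- outside the precondition, e.g. on DihedralEq('`'): A returns {'d', 'f', 'e'}, B raises KeyError; on DihedralEq('['): A returns {'a', 'b', 'c'}, B raises KeyError
import Mathlib
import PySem

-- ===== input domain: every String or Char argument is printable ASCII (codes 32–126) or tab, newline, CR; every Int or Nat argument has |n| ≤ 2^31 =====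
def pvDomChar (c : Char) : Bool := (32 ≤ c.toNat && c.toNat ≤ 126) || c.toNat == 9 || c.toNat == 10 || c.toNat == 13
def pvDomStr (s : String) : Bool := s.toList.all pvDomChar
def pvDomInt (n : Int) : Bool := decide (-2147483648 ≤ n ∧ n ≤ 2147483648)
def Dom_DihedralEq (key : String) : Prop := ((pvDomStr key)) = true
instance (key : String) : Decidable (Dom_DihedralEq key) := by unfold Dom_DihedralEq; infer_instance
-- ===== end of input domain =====

-- B composes the two generator strings into the six dihedral permutation tables once and
-- substitutes the key once per table (6 passes) instead of A's nested per-rotation double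
-- substitution of the key (9 passes). Pre_ restricts keys to the letters a-f (elsewhere A
-- raises IndexError or returns via negative-index wraparound while B raises KeyError).


-- ===== PORT A =====
-- Subst: res = ""; for l in key: res += transf[ord(l) - ord('a')]
-- transf[…] is Python indexing (negative indices wrap): PySem.List.pyGetD; its default 'a'
-- is only reached where Python raises IndexError, which Pre_ excludes.
def SubstA (key transf : String) : String :=
  String.ofList (key.toList.foldl
    (fun res l => res ++ [PySem.List.pyGetD transf.toList ((l.toNat : Int) - 97) 'a']) [])

def DihedralEq (key : String) : List String :=
  let rotations : List String := ["cabfde", "bcaefd", "abcdef"]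
  let flip : String := "bacedf"
  (PySem.List.pyRange 0 3 1).foldl
    (fun result i =>
      PySem.Set.add
        (PySem.Set.add result (SubstA key (PySem.List.pyGetD rotations i "")))
        (SubstA (SubstA key (PySem.List.pyGetD rotations i "")) flip))
    PySem.Set.empty

-- ===== PORT B =====
-- subst(s, table): m = dict(zip("abcdef", table)); "".join(m[c] for c in s)
-- m[c] raises KeyError for c outside the letters a-f (Dict.get? = none); its default 'a' is only
-- reached there, which Pre_ excludes.
def SubstB (s table : String) : String :=
  let m := PySem.Dict.ofList (List.zip "abcdef".toList table.toList)
  String.ofList (s.toList.map (fun c => (m.get? c).getD 'a'))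

def DihedralEq_alt (key : String) : List String :=
  let rot : String := "cabfde"
  let flip : String := "bacedf"
  let gp := (List.range 3).foldl
    (fun (acc : List String × String) _ =>
      (acc.1 ++ [acc.2, SubstB acc.2 flip], SubstB acc.2 rot))
    ([], rot)
  PySem.Set.ofList (gp.1.map (fun g => SubstB key g))

-- ===== PRECONDITION & SPEC =====
-- Pre_ excludes keys with a character outside the letters a-f: A raises IndexError on most
-- of them, and on the six characters just below lowercase a (codes 91-96) A returns an
-- accidental value via negative-index wraparound while B raises KeyError.
def Pre_DihedralEq (key : String) : Prop :=
  key.toList.all (fun c => decide (97 ≤ c.toNat ∧ c.toNat ≤ 102)) = true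
instance (key : String) : Decidable (Pre_DihedralEq key) := by
  unfold Pre_DihedralEq; infer_instance
def pvWitness_DihedralEq : String := "abc"

def Spec_DihedralEq (key : String) (out : List String) : Prop := out = DihedralEq_alt key
instance (key : String) (out : List String) : Decidable (Spec_DihedralEq key out) := by
  unfold Spec_DihedralEq; infer_instance

-- ===== CLAIM (what is proved, stated in full; the proofs are below) =====
def Claim_equal_DihedralEq : Prop :=
  ∀ (key : String), Dom_DihedralEq key → Pre_DihedralEq key →
    Spec_DihedralEq key (DihedralEq key)

-- ===== LEMMAS AND PROOFS =====

lemma char_eq_of_toNat (c d : Char) (h : c.toNat = d.toNat) : c = d :=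
  Char.ext (UInt32.toNat_inj.mp h)

-- a character admitted by Pre_ is one of the six letters
lemma char_cases (c : Char) (h1 : 97 ≤ c.toNat) (h2 : c.toNat ≤ 102) :
    c = 'a' ∨ c = 'b' ∨ c = 'c' ∨ c = 'd' ∨ c = 'e' ∨ c = 'f' := by
  have hv : c.toNat = 97 ∨ c.toNat = 98 ∨ c.toNat = 99 ∨
      c.toNat = 100 ∨ c.toNat = 101 ∨ c.toNat = 102 := by omega
  rcases hv with h | h | h | h | h | h
  · exact Or.inl (char_eq_of_toNat c 'a' h)
  · exact Or.inr (Or.inl (char_eq_of_toNat c 'b' h))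
  · exact Or.inr (Or.inr (Or.inl (char_eq_of_toNat c 'c' h)))
  · exact Or.inr (Or.inr (Or.inr (Or.inl (char_eq_of_toNat c 'd' h))))
  · exact Or.inr (Or.inr (Or.inr (Or.inr (Or.inl (char_eq_of_toNat c 'e' h)))))
  · exact Or.inr (Or.inr (Or.inr (Or.inr (Or.inr (char_eq_of_toNat c 'f' h)))))

-- per-character step functions of the two substitution routines
def stepA (t : String) (c : Char) : Char :=
  PySem.List.pyGetD t.toList ((c.toNat : Int) - 97) 'a'
def stepB (t : String) (c : Char) : Char :=
  ((PySem.Dict.ofList (List.zip "abcdef".toList t.toList)).get? c).getD 'a'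

lemma substA_eq_map (key t : String) :
    SubstA key t = String.ofList (key.toList.map (stepA t)) := by
  unfold SubstA stepA
  rw [PySem.List.foldl_append_singleton_eq_map, List.nil_append]

lemma substB_eq_map (key t : String) :
    SubstB key t = String.ofList (key.toList.map (stepB t)) := rfl

-- single substitution agrees per character, for the tables B uses
lemma stepA_eq_stepB (t : String)
    (ht : t = "cabfde" ∨ t = "bcaefd" ∨ t = "abcdef" ∨ t = "bacedf")
    (c : Char) (h1 : 97 ≤ c.toNat) (h2 : c.toNat ≤ 102) :
    stepA t c = stepB t c := by
  rcases char_cases c h1 h2 with h | h | h | h | h | h <;> subst h <;>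
    rcases ht with h | h | h | h <;> subst h <;> decide

-- A's double substitution agrees with B's substitution by the composed table
lemma stepA_comp (p q pq : String)
    (hp : (p, q, pq) = ("cabfde", "bacedf", "cbafed") ∨
          (p, q, pq) = ("bcaefd", "bacedf", "acbdfe") ∨
          (p, q, pq) = ("abcdef", "bacedf", "bacedf"))
    (c : Char) (h1 : 97 ≤ c.toNat) (h2 : c.toNat ≤ 102) :
    stepA q (stepA p c) = stepB pq c := by
  rcases char_cases c h1 h2 with h | h | h | h | h | h <;> subst h <;>
    rcases hp with h | h | h <;>
      (injection h with h1 h2; injection h2 with h2 h3; subst h1; subst h2; subst h3; decide)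

lemma pre_mem (key : String) (hk : Pre_DihedralEq key) (c : Char) (hc : c ∈ key.toList) :
    97 ≤ c.toNat ∧ c.toNat ≤ 102 := by
  unfold Pre_DihedralEq at hk
  rw [List.all_eq_true] at hk
  simpa using hk c hc

lemma substA_eq_substB (key t : String) (hk : Pre_DihedralEq key)
    (ht : t = "cabfde" ∨ t = "bcaefd" ∨ t = "abcdef" ∨ t = "bacedf") :
    SubstA key t = SubstB key t := by
  rw [substA_eq_map, substB_eq_map]
  congr 1
  apply List.map_congr_left
  intro c hc
  exact stepA_eq_stepB t ht c (pre_mem key hk c hc).1 (pre_mem key hk c hc).2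

lemma substA_comp_eq_substB (key p q pq : String) (hk : Pre_DihedralEq key)
    (hp : (p, q, pq) = ("cabfde", "bacedf", "cbafed") ∨
          (p, q, pq) = ("bcaefd", "bacedf", "acbdfe") ∨
          (p, q, pq) = ("abcdef", "bacedf", "bacedf")) :
    SubstA (SubstA key p) q = SubstB key pq := by
  rw [substA_eq_map key p, substA_eq_map, substB_eq_map]
  simp only [String.toList_ofList, List.map_map]
  congr 1
  apply List.map_congr_left
  intro c hc
  exact stepA_comp p q pq hp c (pre_mem key hk c hc).1 (pre_mem key hk c hc).2

-- B's group list, fully evaluated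
lemma group_eval :
    ((List.range 3).foldl
      (fun (acc : List String × String) _ =>
        (acc.1 ++ [acc.2, SubstB acc.2 "bacedf"], SubstB acc.2 "cabfde"))
      ([], "cabfde")).1 =
    ["cabfde", "cbafed", "bcaefd", "acbdfe", "abcdef", "bacedf"] := by
  rfl

set_option maxHeartbeats 1000000 in
theorem DihedralEq_spec : Claim_equal_DihedralEq := by
  unfold Claim_equal_DihedralEq
  intro key _ hk
  unfold Spec_DihedralEq DihedralEq DihedralEq_alt
  have hr : PySem.List.pyRange 0 3 1 = [0, 1, 2] := by decide
  dsimp only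
  rw [hr, group_eval]
  simp only [List.foldl, List.map]
  have e1 := substA_eq_substB key "cabfde" hk (Or.inl rfl)
  have e3 := substA_eq_substB key "bcaefd" hk (Or.inr (Or.inl rfl))
  have e5 := substA_eq_substB key "abcdef" hk (Or.inr (Or.inr (Or.inl rfl)))
  have e2 := substA_comp_eq_substB key "cabfde" "bacedf" "cbafed" hk (Or.inl rfl)
  have e4 := substA_comp_eq_substB key "bcaefd" "bacedf" "acbdfe" hk (Or.inr (Or.inl rfl))
  have e6 := substA_comp_eq_substB key "abcdef" "bacedf" "bacedf" hk (Or.inr (Or.inr rfl))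
  rw [show (PySem.List.pyGetD ["cabfde", "bcaefd", "abcdef"] (0:Int) "") = "cabfde" by decide,
      show (PySem.List.pyGetD ["cabfde", "bcaefd", "abcdef"] (1:Int) "") = "bcaefd" by decide,
      show (PySem.List.pyGetD ["cabfde", "bcaefd", "abcdef"] (2:Int) "") = "abcdef" by decide]
  rw [e2, e4, e6, e1, e3, e5]
  rfl
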